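-- pv_equiv track=rewrite | github.com/match8969/practice_python | test_works/file_exec.py | get_dict_for_fivegrapth_6elements
-- ===== SOURCE A (Python) =====
-- def get_dict_for_fivegrapth_6elements(list_number):
--     dict_colors_val = {'0': 0, '1': 0, '2': 0, '3': 0, '4': 0, '5 and more': 0}
--     element = 0
--     for number in list_number:
--
--         if element < 1:
--             dict_colors_val['0'] = number
--         elif element < 2:
--             dict_colors_val['1'] = number
--         elif element < 3:
--             dict_colors_val['2'] = number
--         elif element < 4:
--             dict_colors_val['3'] = number
--         elif element < 5:
--             dict_colors_val['4'] = number
--         elif element >= 5: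
--             dict_colors_val['5 and more'] = number
--         else:
--
--             break
--         element += 1
--
--     return dict_colors_val
-- ===== SOURCE B (Python) =====
-- def get_dict_for_fivegrapth_6elements(list_number):
--     lst = list(list_number)
--     d = {'0': 0, '1': 0, '2': 0, '3': 0, '4': 0, '5 and more': 0}
--     for key, value in zip(('0', '1', '2', '3', '4'), lst):
--         d[key] = value
--     if len(lst) >= 6:
--         d['5 and more'] = lst[-1]
--     return d
-- ===== Notes on version B (the rewrite author's own statement) =====
-- stated objective: simpler
-- what changed: Replaces the per-element six-branch if/elif counter loop with a zip of the five fixed keys against the list plus one conditional assignment of the last element to '5 and more' when the list has 6 or more elements.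
import Mathlib
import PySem

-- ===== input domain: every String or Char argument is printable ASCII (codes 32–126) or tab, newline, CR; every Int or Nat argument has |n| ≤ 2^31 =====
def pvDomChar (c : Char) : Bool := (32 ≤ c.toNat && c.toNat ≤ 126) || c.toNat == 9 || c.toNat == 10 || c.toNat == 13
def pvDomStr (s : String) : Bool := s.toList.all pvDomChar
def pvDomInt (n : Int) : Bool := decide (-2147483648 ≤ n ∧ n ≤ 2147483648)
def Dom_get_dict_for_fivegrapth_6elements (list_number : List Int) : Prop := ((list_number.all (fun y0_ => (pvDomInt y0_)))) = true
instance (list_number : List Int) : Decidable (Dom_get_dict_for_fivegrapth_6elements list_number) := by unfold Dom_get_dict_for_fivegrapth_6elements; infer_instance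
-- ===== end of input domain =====

-- B replaces A's per-element six-branch if/elif counter loop by a zip over the five fixed
-- keys plus one conditional assignment of the last element; objective: simpler.

-- ===== PORT A =====
-- one loop step of A: branch on the running counter 'element'
def pvStepA (s : PySem.Dict String Int × Int) (number : Int) : PySem.Dict String Int × Int :=
  if s.2 < 1 then (s.1.insert "0" number, s.2 + 1)
  else if s.2 < 2 then (s.1.insert "1" number, s.2 + 1)
  else if s.2 < 3 then (s.1.insert "2" number, s.2 + 1)
  else if s.2 < 4 then (s.1.insert "3" number, s.2 + 1)
  else if s.2 < 5 then (s.1.insert "4" number, s.2 + 1)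
  else if s.2 ≥ 5 then (s.1.insert "5 and more" number, s.2 + 1)
  else s  -- Python's 'break' branch: unreachable, the conditions above are exhaustive

def get_dict_for_fivegrapth_6elements (list_number : List Int) : List (String × Int) :=
  let dict_colors_val : PySem.Dict String Int :=
    PySem.Dict.ofList [("0", 0), ("1", 0), ("2", 0), ("3", 0), ("4", 0), ("5 and more", 0)]
  (list_number.foldl pvStepA (dict_colors_val, 0)).1.items

-- ===== PORT B =====
def get_dict_for_fivegrapth_6elements_alt (list_number : List Int) : List (String × Int) :=
  let d : PySem.Dict String Int :=
    PySem.Dict.ofList [("0", 0), ("1", 0), ("2", 0), ("3", 0), ("4", 0), ("5 and more", 0)]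
  let d1 := ((["0", "1", "2", "3", "4"].zip list_number).foldl
    (fun d kv => d.insert kv.1 kv.2) d)
  let d2 := if list_number.length ≥ 6 then
      -- lst[-1]; the guard guarantees the list is nonempty, so pyGet? returns a value
      d1.insert "5 and more" ((PySem.List.pyGet? list_number (-1)).getD 0)
    else d1
  d2.items

-- ===== PRECONDITION & SPEC =====
def Spec_get_dict_for_fivegrapth_6elements (list_number : List Int) (out : List (String × Int)) : Prop := out = get_dict_for_fivegrapth_6elements_alt list_number
instance (list_number : List Int) (out : List (String × Int)) : Decidable (Spec_get_dict_for_fivegrapth_6elements list_number out) := by unfold Spec_get_dict_for_fivegrapth_6elements; infer_instance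

-- ===== CLAIM (what is proved, stated in full; the proofs are below) =====
def Claim_equal_get_dict_for_fivegrapth_6elements : Prop := ∀ (list_number : List Int), Dom_get_dict_for_fivegrapth_6elements list_number → Spec_get_dict_for_fivegrapth_6elements list_number (get_dict_for_fivegrapth_6elements list_number)

-- ===== LEMMAS AND PROOFS =====

-- once the counter has reached 5, every step of A overwrites '5 and more';
-- the fold over x :: rest therefore leaves the last element of x :: rest there
theorem pvTailA (rest : List Int) : ∀ (x : Int) (d : PySem.Dict String Int) (e : Int), 5 ≤ e →
    ((x :: rest).foldl pvStepA (d, e)).1 = d.insert "5 and more" (rest.getLastD x) := by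
  induction rest with
  | nil =>
      intro x d e he
      simp only [List.foldl, pvStepA, List.getLastD]
      split_ifs <;> first | rfl | omega
  | cons y ys ih =>
      intro x d e he
      have hstep : pvStepA (d, e) x = (d.insert "5 and more" x, e + 1) := by
        simp only [pvStepA]
        split_ifs <;> first | rfl | omega
      calc ((x :: y :: ys).foldl pvStepA (d, e)).1
          = ((y :: ys).foldl pvStepA (pvStepA (d, e) x)).1 := rfl
        _ = ((y :: ys).foldl pvStepA (d.insert "5 and more" x, e + 1)).1 := by rw [hstep]
        _ = (d.insert "5 and more" x).insert "5 and more" (ys.getLastD y) := ih y _ (e + 1) (by omega)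
        _ = d.insert "5 and more" (ys.getLastD y) := PySem.Dict.insert_insert_self _ _ _ _
        _ = d.insert "5 and more" ((y :: ys).getLastD x) := by rw [List.getLastD_cons]

-- ===== VERDICT (by name: the statement is the Claim_ definition above) =====
theorem get_dict_for_fivegrapth_6elements_spec : Claim_equal_get_dict_for_fivegrapth_6elements := by
  unfold Claim_equal_get_dict_for_fivegrapth_6elements
  intro l _
  unfold Spec_get_dict_for_fivegrapth_6elements
  match l with
  | [] => rfl
  | [a] => rfl
  | [a, b] => rfl
  | [a, b, c] => rfl
  | [a, b, c, d] => rfl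
  | [a, b, c, d, e] => rfl
  | a :: b :: c :: d :: e :: f :: rest =>
      dsimp only [get_dict_for_fivegrapth_6elements, get_dict_for_fivegrapth_6elements_alt]
      have hlen : (a :: b :: c :: d :: e :: f :: rest).length ≥ 6 := by
        simp
      have hstep : List.foldl pvStepA
          ((PySem.Dict.ofList [("0", 0), ("1", 0), ("2", 0), ("3", 0), ("4", 0), ("5 and more", 0)] : PySem.Dict String Int), (0 : Int))
          (a :: b :: c :: d :: e :: f :: rest)
          = List.foldl pvStepA
            (((PySem.Dict.ofList [("0", 0), ("1", 0), ("2", 0), ("3", 0), ("4", 0), ("5 and more", 0)] : PySem.Dict String Int) |>.insert "0" a |>.insert "1" b |>.insert "2" c |>.insert "3" d |>.insert "4" e), (5 : Int))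
            (f :: rest) := rfl
      have hA : (List.foldl pvStepA
          ((PySem.Dict.ofList [("0", 0), ("1", 0), ("2", 0), ("3", 0), ("4", 0), ("5 and more", 0)] : PySem.Dict String Int), (0 : Int))
          (a :: b :: c :: d :: e :: f :: rest)).1
          = ((PySem.Dict.ofList [("0", 0), ("1", 0), ("2", 0), ("3", 0), ("4", 0), ("5 and more", 0)] : PySem.Dict String Int) |>.insert "0" a |>.insert "1" b |>.insert "2" c |>.insert "3" d |>.insert "4" e |>.insert "5 and more" (rest.getLastD f)) := by
        rw [hstep]
        exact pvTailA rest f _ 5 le_rfl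
      rw [hA]
      simp only [hlen, if_pos, List.zip, List.zipWith, List.foldl,
        PySem.List.pyGet?_neg_one, List.getLast?_cons, Option.getD_some]
      simp [List.getLastD_eq_getLast?]
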